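-- pv_equiv track=rewrite | github.com/RainTreeCrow/Coding-Assessments | trading_strategy.py | WaysOfAchievingDesiredPosition
-- ===== SOURCE A (Python) =====
-- def WaysOfAchievingDesiredPosition(n, k, m):
--     # Write your code here
--     if k + m < n or k - m > n:
--         return 0
--
--     # number of sequences to achieve [k-m to k+m (shares of stock)]
--     # after performing [0 to m (number of transactions)]
--     offset, maxshare = k-m, 2*m+1
--     dp = [[0] * maxshare for _ in range(m+1)]
--
--     # having k shares of stocks after 0 transactions
--     dp[0][k-offset] = 1
--
--     # 1 to m transactions
--     for i in range(1, m+1):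
--         # k-m to k+m shares of stock
--         for j in range(maxshare):
--             if j > 0:
--                 # can be achieved through buying
--                 dp[i][j] += dp[i-1][j-1]
--             if j < maxshare-1:
--                 # can be achieve through selling
--                 dp[i][j] += dp[i-1][j+1]
--
--     # maximum m steps (sum of 0-m steps)
--     return sum(dp[i][n-offset] for i in range(m+1))
-- ===== SOURCE B (Python) =====
-- def WaysOfAchievingDesiredPosition(n, k, m):
--     # Closed-form: sum of binomial coefficients C(i, (i+d)/2) over i = |d|, |d|+2, ..., m,
--     # computed incrementally in O(m) arithmetic operations.
--     d = n - k
--     a = abs(d)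
--     if a > m:
--         return 0
--     total = 0
--     c = 1  # c = C(i, (i+d)//2), starting at i = a where it is 1
--     i = a
--     while i <= m:
--         total += c
--         t = (i + d) // 2
--         c = c * (i + 1) * (i + 2) // ((t + 1) * (i - t + 1))
--         i += 2
--     return total
-- ===== Notes on version B (the rewrite author's own statement) =====
-- stated objective: faster
-- what changed: Replaces the (m+1)x(2m+1) dynamic-programming table with a closed-form sum of binomial coefficients C(i,(i+n-k)/2) over i = |n-k|, |n-k|+2, ..., m, each obtained from the previous one by a constant number of multiplications/divisions.
import Mathlib
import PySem

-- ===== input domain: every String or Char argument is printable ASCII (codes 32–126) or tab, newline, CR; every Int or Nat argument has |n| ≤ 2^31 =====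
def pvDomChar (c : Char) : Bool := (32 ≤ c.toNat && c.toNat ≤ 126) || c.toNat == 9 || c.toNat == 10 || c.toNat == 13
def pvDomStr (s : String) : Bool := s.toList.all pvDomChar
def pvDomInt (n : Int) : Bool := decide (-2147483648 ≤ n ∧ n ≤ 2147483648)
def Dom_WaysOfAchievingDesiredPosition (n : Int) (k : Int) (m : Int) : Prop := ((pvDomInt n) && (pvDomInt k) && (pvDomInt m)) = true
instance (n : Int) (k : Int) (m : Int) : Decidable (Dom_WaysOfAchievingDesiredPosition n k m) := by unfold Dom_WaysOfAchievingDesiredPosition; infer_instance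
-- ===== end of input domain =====

-- B replaces A's (m+1)×(2m+1) dynamic-programming table by an incremental sum of
-- binomial coefficients C(i, (i+n-k)/2) for i = |n-k|, |n-k|+2, …, m (objective: faster).

-- ===== PORT A =====
-- inner loop over j (one dp row computed from the previous one); all indices the Python
-- touches are in range, so pyGetD _ _ 0 is exact for dp[i-1][j±1]
def pvStepRow (prev : List Int) (maxshare : Int) : List Int :=
  (PySem.List.pyRange 0 maxshare 1).map (fun j =>
    (if j > 0 then PySem.List.pyGetD prev (j - 1) 0 else 0) +
    (if j < maxshare - 1 then PySem.List.pyGetD prev (j + 1) 0 else 0))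

def WaysOfAchievingDesiredPosition (n : Int) (k : Int) (m : Int) : Int :=
  if k + m < n ∨ k - m > n then 0
  else
    let offset := k - m
    let maxshare := 2 * m + 1
    -- dp[0] = [0]*maxshare with dp[0][k-offset] = 1 ('*maxshare' is [] for maxshare < 0, as toNat)
    let dp0 : List Int := PySem.List.pySetD (List.replicate maxshare.toNat 0) (k - offset) 1
    -- rows i = 1..m, each appended after being filled from row i-1
    let rows : List (List Int) :=
      (PySem.List.pyRange 1 (m + 1) 1).foldl
        (fun acc _i => acc ++ [pvStepRow (acc.getLastD []) maxshare]) [dp0]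
    ((PySem.List.pyRange 0 (m + 1) 1).map
      (fun i => PySem.List.pyGetD (PySem.List.pyGetD rows i ([] : List Int)) (n - offset) 0)).sum

-- ===== PORT B =====
-- the while-loop of Source B; it runs (m-a)//2 + 1 times (i = a, a+2, …, ≤ m), which the
-- caller passes as the fuel argument
def pvAltLoop : Nat → Int → Int → Int → Int → Int
  | 0, _, _, total, _ => total
  | steps + 1, d, i, total, c =>
      let t := PySem.Int.floordiv (i + d) 2
      pvAltLoop steps d (i + 2) (total + c)
        (PySem.Int.floordiv (c * (i + 1) * (i + 2)) ((t + 1) * (i - t + 1)))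

def WaysOfAchievingDesiredPosition_alt (n : Int) (k : Int) (m : Int) : Int :=
  let d := n - k
  let a := |d|
  if a > m then 0
  else pvAltLoop (((m - a) / 2).toNat + 1) d a 0 1

-- ===== PRECONDITION & SPEC =====
def Spec_WaysOfAchievingDesiredPosition (n : Int) (k : Int) (m : Int) (out : Int) : Prop := out = WaysOfAchievingDesiredPosition_alt n k m
instance (n : Int) (k : Int) (m : Int) (out : Int) : Decidable (Spec_WaysOfAchievingDesiredPosition n k m out) := by unfold Spec_WaysOfAchievingDesiredPosition; infer_instance

-- ===== CLAIM (what is proved, stated in full; the proofs are below) =====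
def Claim_equal_WaysOfAchievingDesiredPosition : Prop := ∀ (n : Int) (k : Int) (m : Int), Dom_WaysOfAchievingDesiredPosition n k m → Spec_WaysOfAchievingDesiredPosition n k m (WaysOfAchievingDesiredPosition n k m)

-- ===== LEMMAS AND PROOFS =====

-- number of ±1-step walks of length i with total displacement x
def pvWalk : Nat → Int → Int
  | 0, x => if x = 0 then 1 else 0
  | i + 1, x => pvWalk i (x - 1) + pvWalk i (x + 1)

-- the dp row after i transactions, displacement j - M
def pvRowOf (M i : Nat) : List Int :=
  (List.range (2 * M + 1)).map (fun (j : Nat) => pvWalk i ((j : Int) - (M : Int)))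

lemma pvWalk_zero (i : Nat) : ∀ (x : Int), ((i : Int) < x ∨ x < -(i : Int)) → pvWalk i x = 0 := by
  induction i with
  | zero => intro x h; simp [pvWalk]; omega
  | succ i ih =>
    intro x h
    have h1 : pvWalk i (x - 1) = 0 := ih _ (by push_cast at h ⊢; omega)
    have h2 : pvWalk i (x + 1) = 0 := ih _ (by push_cast at h ⊢; omega)
    simp [pvWalk, h1, h2]

lemma pvWalk_odd (i : Nat) : ∀ (x : Int), ¬ (2 ∣ ((i : Int) + x)) → pvWalk i x = 0 := by
  induction i with
  | zero => intro x h; simp [pvWalk]; omega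
  | succ i ih =>
    intro x h
    have h1 : pvWalk i (x - 1) = 0 := ih _ (by push_cast at h ⊢; omega)
    have h2 : pvWalk i (x + 1) = 0 := ih _ (by push_cast at h ⊢; omega)
    simp [pvWalk, h1, h2]

lemma pvWalk_choose (i : Nat) : ∀ (t : Nat), pvWalk i (2 * (t : Int) - i) = (i.choose t : Int) := by
  induction i with
  | zero =>
    intro t
    cases t with
    | zero => simp [pvWalk]
    | succ s => simp [pvWalk]; omega
  | succ i ih =>
    intro t
    cases t with
    | zero =>
      have h1 : pvWalk i (2 * (0 : Int) - (i + 1 : Nat) - 1) = 0 := by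
        apply pvWalk_zero; push_cast; omega
      have h2 := ih 0
      show pvWalk i _ + pvWalk i _ = _
      rw [show (2 * ((0:Nat) : Int) - ((i+1 : Nat) : Int) - 1) = 2 * (0 : Int) - (i + 1 : Nat) - 1 by push_cast; ring]
      rw [h1]
      rw [show (2 * ((0:Nat) : Int) - ((i+1 : Nat) : Int) + 1) = 2 * ((0:Nat) : Int) - i by push_cast; ring]
      rw [h2]; simp
    | succ s =>
      show pvWalk i _ + pvWalk i _ = _
      rw [show (2 * ((s+1 : Nat) : Int) - ((i+1 : Nat) : Int) - 1) = 2 * ((s : Nat) : Int) - i by push_cast; ring]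
      rw [show (2 * ((s+1 : Nat) : Int) - ((i+1 : Nat) : Int) + 1) = 2 * ((s+1 : Nat) : Int) - i by push_cast; ring]
      rw [ih s, ih (s + 1)]
      rw [show (i + 1).choose (s + 1) = i.choose s + i.choose (s + 1) from Nat.choose_succ_succ i s]
      push_cast; ring

lemma pvSumRange (f : Nat → Int) (n : Nat) :
    ((List.range n).map f).sum = ∑ j ∈ Finset.range n, f j := by
  induction n with
  | zero => simp
  | succ n ih => rw [List.range_succ, Finset.sum_range_succ]; simp [ih]

lemma pvRowGet (M i : Nat) (x : Int) (h0 : 0 ≤ x) (h1 : x ≤ 2 * M) :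
    PySem.List.pyGetD (pvRowOf M i) x 0 = pvWalk i (x - M) := by
  have hx : x = ((x.toNat : Nat) : Int) := by omega
  rw [hx, PySem.List.pyGetD_natCast]
  have hlt : x.toNat < 2 * M + 1 := by omega
  rw [pvRowOf, List.getD_eq_getElem?_getD, List.getElem?_map, List.getElem?_range hlt]
  simp only [Option.map_some, Option.getD_some]

lemma pvLastMapRange (f : Nat → List Int) (s : Nat) :
    ((List.range (s + 1)).map f).getLastD [] = f s := by
  rw [List.range_succ, List.map_append]
  exact List.getLastD_concat

lemma pvStep (M i : Nat) (h : i < M) :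
    pvStepRow (pvRowOf M i) (2 * (M : Int) + 1) = pvRowOf M (i + 1) := by
  apply List.ext_getElem
  · simp [pvStepRow, pvRowOf, PySem.List.length_pyRange_one]; omega
  · intro j h1 h2
    simp only [pvStepRow, List.getElem_map, PySem.List.getElem_pyRange_one]
    simp only [pvStepRow, List.length_map, PySem.List.length_pyRange_one] at h1
    have hj : j < 2 * M + 1 := by omega
    have hR : (pvRowOf M (i + 1))[j]'h2 = pvWalk (i + 1) ((j : Int) - (M : Int)) := by
      simp [pvRowOf]
    rw [hR]
    rw [show pvWalk (i + 1) ((j : Int) - (M : Int))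
          = pvWalk i ((j : Int) - M - 1) + pvWalk i ((j : Int) - M + 1) from rfl]
    by_cases hj0 : (0 : Int) + j > 0
    · by_cases hjm : (0 : Int) + j < 2 * (M : Int) + 1 - 1
      · rw [if_pos hj0, if_pos hjm]
        rw [pvRowGet M i ((0:Int) + j - 1) (by omega) (by omega)]
        rw [pvRowGet M i ((0:Int) + j + 1) (by omega) (by omega)]
        congr 1 <;> congr 1 <;> omega
      · -- j = 2M: the missing selling term is walk i (M+1) = 0
        rw [if_pos hj0, if_neg hjm]
        rw [pvRowGet M i ((0:Int) + j - 1) (by omega) (by omega)]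
        have : pvWalk i ((j : Int) - M + 1) = 0 := by
          apply pvWalk_zero; left; omega
        rw [this]; rw [show ((0:Int) + j - 1 - M) = (j : Int) - M - 1 by ring]
    · -- j = 0: the missing buying term is walk i (-M-1) = 0
      rw [if_neg hj0, if_pos (by omega)]
      rw [pvRowGet M i ((0:Int) + j + 1) (by omega) (by omega)]
      have : pvWalk i ((j : Int) - M - 1) = 0 := by
        apply pvWalk_zero; right; omega
      rw [this]; rw [show ((0:Int) + j + 1 - M) = (j : Int) - M + 1 by ring]

lemma pvBuild (M : Nat) (L : List Int) : ∀ (s : Nat), s + L.length ≤ M →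
    L.foldl (fun acc _i => acc ++ [pvStepRow (acc.getLastD []) (2 * (M : Int) + 1)])
        ((List.range (s + 1)).map (pvRowOf M))
      = (List.range (s + L.length + 1)).map (pvRowOf M) := by
  induction L with
  | nil => intro s _; simp
  | cons x L ih =>
    intro s hs
    simp only [List.foldl_cons]
    rw [pvLastMapRange, pvStep M s (by simp at hs; omega)]
    rw [show (List.range (s + 1)).map (pvRowOf M) ++ [pvRowOf M (s + 1)]
          = (List.range (s + 1 + 1)).map (pvRowOf M) by simp [List.range_succ]]
    rw [ih (s + 1) (by simp at hs ⊢; omega)]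
    congr 2
    simp; omega

-- dp[0] is row 0
lemma pvRow0 (M : Nat) :
    PySem.List.pySetD (List.replicate ((2 * (M : Int) + 1).toNat) (0 : Int)) (M : Int) 1
      = pvRowOf M 0 := by
  rw [PySem.List.pySetD_natCast]
  apply List.ext_getElem
  · simp [pvRowOf]; omega
  · intro j h1 h2
    simp only [List.getElem_set, List.getElem_replicate, pvRowOf, List.getElem_map,
      List.getElem_range]
    simp only [List.length_set, List.length_replicate] at h1
    show _ = pvWalk 0 _
    simp only [pvWalk]
    split_ifs with hA hB hB
    · rfl
    · omega
    · omega
    · rfl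

-- A (when the guard does not fire) computes Σ_{i=0}^{m} walk i (n-k)
lemma pvA_eq_sum (n k m : Int) (hg : ¬ (k + m < n ∨ k - m > n)) :
    WaysOfAchievingDesiredPosition n k m
      = ((List.range (m.toNat + 1)).map (fun i => pvWalk i (n - k))).sum := by
  have hm : 0 ≤ m := by omega
  unfold WaysOfAchievingDesiredPosition
  rw [if_neg hg]
  simp only
  set M := m.toNat with hM
  have hmM : (M : Int) = m := by omega
  have e1 : 2 * m + 1 = 2 * (M : Int) + 1 := by omega
  have e2 : k - (k - m) = (M : Int) := by omega
  rw [e1, e2, pvRow0 M]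
  have hrows :
      (PySem.List.pyRange 1 (m + 1) 1).foldl
          (fun acc _i => acc ++ [pvStepRow (acc.getLastD []) (2 * (M : Int) + 1)]) [pvRowOf M 0]
        = (List.range (M + 1)).map (pvRowOf M) := by
    have h0 : [pvRowOf M 0] = (List.range (0 + 1)).map (pvRowOf M) := by simp
    rw [h0, pvBuild M _ 0 (by rw [PySem.List.length_pyRange_one]; omega)]
    congr 2
    rw [PySem.List.length_pyRange_one]; omega
  rw [hrows]
  apply congrArg List.sum
  apply List.ext_getElem
  · simp [PySem.List.length_pyRange_one]; omega
  · intro i h1 h2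
    simp only [List.getElem_map, PySem.List.getElem_pyRange_one, List.getElem_range]
    simp only [List.length_map, PySem.List.length_pyRange_one] at h1
    have hi : i < M + 1 := by omega
    rw [show ((0 : Int) + i) = ((i : Nat) : Int) by ring, PySem.List.pyGetD_natCast]
    rw [List.getD_eq_getElem?_getD, List.getElem?_map, List.getElem?_range hi]
    simp only [Option.map_some, Option.getD_some]
    rw [pvRowGet M i (n - (k - m)) (by omega) (by omega)]
    congr 1
    omega

-- the loop of B accumulates the binomial coefficients
lemma pvAltLoop_eq (steps : Nat) : ∀ (d i total c : Int),
    |d| ≤ i → 2 ∣ (i + d) → c = ((i.toNat.choose ((i + d) / 2).toNat : Nat) : Int) →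
    pvAltLoop steps d i total c
      = total + ∑ j ∈ Finset.range steps,
          ((i.toNat + 2 * j).choose (((i + d) / 2).toNat + j) : Int) := by
  induction steps with
  | zero => intro d i total c _ _ _; simp [pvAltLoop]
  | succ steps ih =>
    intro d i total c hai hpar hc
    have hd' := abs_le.mp hai
    have hi0 : 0 ≤ i := by omega
    have ht0 : 0 ≤ (i + d) / 2 := by omega
    have hti : (i + d) / 2 ≤ i := by omega
    set t := (i + d) / 2 with htdef
    have h2t : 2 * t = i + d := by omega
    show pvAltLoop steps d (i + 2) (total + c)
        (PySem.Int.floordiv (c * (i + 1) * (i + 2)) ((PySem.Int.floordiv (i + d) 2 + 1) * (i - PySem.Int.floordiv (i + d) 2 + 1))) = _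
    rw [show PySem.Int.floordiv (i + d) 2 = t from by
      rw [PySem.Int.floordiv_eq_ediv_of_pos (by norm_num)]]
    -- the new coefficient is exactly C(i+2, t+1)
    have hI : i.toNat + 2 = (i + 2).toNat := by omega
    have hT : t.toNat + 1 = (((i + 2) + d) / 2).toNat := by omega
    have key : ((i + 2).toNat.choose (((i + 2) + d) / 2).toNat : Int) * ((t + 1) * (i - t + 1))
        = c * (i + 1) * (i + 2) := by
      rw [hc, ← hI, ← hT]
      have hTle : t.toNat ≤ i.toNat := by omega
      have n1 : (i.toNat + 1) * i.toNat.choose t.toNat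
          = (i.toNat + 1).choose (t.toNat + 1) * (t.toNat + 1) := Nat.add_one_mul_choose_eq i.toNat t.toNat
      have n2 : (i.toNat + 1).choose (t.toNat + 1) * (i.toNat + 2)
          = (i.toNat + 2).choose (t.toNat + 1) * (i.toNat + 2 - (t.toNat + 1)) :=
        Nat.choose_mul_succ_eq (i.toNat + 1) (t.toNat + 1)
      have hnat : (i.toNat + 2).choose (t.toNat + 1) * ((t.toNat + 1) * (i.toNat - t.toNat + 1))
          = i.toNat.choose t.toNat * (i.toNat + 1) * (i.toNat + 2) := by
        have e : i.toNat + 2 - (t.toNat + 1) = i.toNat - t.toNat + 1 := by omega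
        calc (i.toNat + 2).choose (t.toNat + 1) * ((t.toNat + 1) * (i.toNat - t.toNat + 1))
            = ((i.toNat + 2).choose (t.toNat + 1) * (i.toNat + 2 - (t.toNat + 1))) * (t.toNat + 1) := by
              rw [e]; ring
          _ = ((i.toNat + 1).choose (t.toNat + 1) * (i.toNat + 2)) * (t.toNat + 1) := by rw [n2]
          _ = ((i.toNat + 1) * i.toNat.choose t.toNat) * (i.toNat + 2) := by rw [n1]; ring
          _ = _ := by ring
      have := congrArg (fun x : Nat => (x : Int)) hnat
      push_cast at this
      rw [show ((t : Int) + 1) = ((t.toNat : Nat) : Int) + 1 by omega,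
          show (i - t + 1 : Int) = ((i.toNat : Nat) : Int) - t.toNat + 1 by omega,
          show ((i : Int) + 1) = ((i.toNat : Nat) : Int) + 1 by omega,
          show ((i : Int) + 2) = ((i.toNat : Nat) : Int) + 2 by omega]
      rw [show (((i.toNat : Nat) : Int) - (t.toNat : Nat) + 1) = (((i.toNat - t.toNat : Nat) : Nat) : Int) + 1 by omega]
      linarith [this]
    have hdiv : PySem.Int.floordiv (c * (i + 1) * (i + 2)) ((t + 1) * (i - t + 1))
        = ((i + 2).toNat.choose (((i + 2) + d) / 2).toNat : Int) := by
      rw [PySem.Int.floordiv_eq_ediv_of_pos (mul_pos (by omega) (by omega)), ← key,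
        Int.mul_ediv_cancel _ (ne_of_gt (mul_pos (by omega) (by omega)))]
    rw [hdiv]
    rw [ih d (i + 2) (total + c) _ (by omega) (by omega) rfl]
    rw [Finset.sum_range_succ']
    have : ∀ j, (((i + 2).toNat + 2 * j).choose ((((i + 2) + d) / 2).toNat + j) : Int)
        = ((i.toNat + 2 * (j + 1)).choose (t.toNat + (j + 1)) : Int) := by
      intro j
      rw [show (i + 2).toNat + 2 * j = i.toNat + 2 * (j + 1) by omega,
          show (((i + 2) + d) / 2).toNat + j = t.toNat + (j + 1) by omega]
    simp only [this]
    simp only [Nat.mul_zero, Nat.add_zero]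
    rw [hc]
    ring

-- Σ over all i of walk i d restricted to the arithmetic progression where it is nonzero
lemma pvSum_walk (d : Int) (M : Nat) (hdM : |d| ≤ (M : Int)) :
    ∑ i ∈ Finset.range (M + 1), pvWalk i d
      = ∑ j ∈ Finset.range ((M - |d|.toNat) / 2 + 1),
          pvWalk (|d|.toNat + 2 * j) d := by
  set A := |d|.toNat with hA
  have habs0 : 0 ≤ |d| := abs_nonneg d
  have hAd : (A : Int) = |d| := by omega
  rw [← Finset.sum_filter_of_ne (p := fun i => A ≤ i ∧ (i - A) % 2 = 0)
      (f := fun i => pvWalk i d) ?_]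
  · apply Finset.sum_nbij' (i := fun i => (i - A) / 2) (j := fun j => A + 2 * j)
    · intro a ha
      simp only [Finset.mem_filter, Finset.mem_range] at ha ⊢
      omega
    · intro j hj
      simp only [Finset.mem_filter, Finset.mem_range] at hj ⊢
      omega
    · intro a ha
      simp only [Finset.mem_filter, Finset.mem_range] at ha
      omega
    · intro j hj; omega
    · intro a ha
      simp only [Finset.mem_filter, Finset.mem_range] at ha
      congr 1
      omega
  · intro i _ hne
    by_contra hp
    apply hne
    by_cases hilt : A ≤ i
    · -- parity mismatch
      have hpar : (i - A) % 2 ≠ 0 := by tauto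
      apply pvWalk_odd
      have : ¬ (2 ∣ (i - A : Nat)) := by omega
      -- A ≡ |d| ≡ d (mod 2)
      have habs : 2 ∣ ((A : Int) + d) := by
        rcases abs_cases d with ⟨h1, _⟩ | ⟨h1, _⟩ <;> omega
      omega
    · exact pvWalk_zero i d (by rcases abs_cases d with ⟨h1, _⟩ | ⟨h1, _⟩ <;> omega)

-- ===== VERDICT (by name: the statement is the Claim_ definition above) =====
theorem WaysOfAchievingDesiredPosition_spec : Claim_equal_WaysOfAchievingDesiredPosition := by
  intro n k m _
  show WaysOfAchievingDesiredPosition n k m = WaysOfAchievingDesiredPosition_alt n k m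
  by_cases hg : k + m < n ∨ k - m > n
  · unfold WaysOfAchievingDesiredPosition WaysOfAchievingDesiredPosition_alt
    rw [if_pos hg]
    simp only
    rw [if_pos (by rcases abs_cases (n - k) with ⟨h1, _⟩ | ⟨h1, _⟩ <;> omega)]
  · have hm : 0 ≤ m := by omega
    have hd : |n - k| ≤ m := by rcases abs_cases (n - k) with ⟨h1, _⟩ | ⟨h1, _⟩ <;> omega
    rw [pvA_eq_sum n k m hg]
    unfold WaysOfAchievingDesiredPosition_alt
    simp only
    rw [if_neg (by omega)]
    set d := n - k with hddef
    have hApos : (0 : Int) ≤ |d| := abs_nonneg d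
    rw [pvAltLoop_eq _ d |d| 0 1 le_rfl
        (by rcases abs_cases d with ⟨h1, _⟩ | ⟨h1, _⟩ <;> omega)
        (by
          rcases abs_cases d with ⟨h1, h2⟩ | ⟨h1, h2⟩
          · rw [h1, show (d + d) / 2 = d by omega]
            simp
          · rw [h1, show (-d + d) / 2 = 0 by omega]
            simp)]
    rw [pvSumRange, pvSum_walk d m.toNat (by omega)]
    rw [show ((m - |d|) / 2).toNat + 1 = (m.toNat - |d|.toNat) / 2 + 1 by omega]
    rw [zero_add]
    apply Finset.sum_congr rfl
    intro j _
    have h2t : 2 * ((|d| + d) / 2) = |d| + d := by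
      rcases abs_cases d with ⟨h1, _⟩ | ⟨h1, _⟩ <;> omega
    rw [show |d|.toNat + 2 * j = (|d|.toNat + 2 * j : Nat) from rfl]
    rw [show pvWalk (|d|.toNat + 2 * j) d
          = pvWalk (|d|.toNat + 2 * j) (2 * (((((|d| + d) / 2).toNat) + j : Nat) : Int) - ((|d|.toNat + 2 * j : Nat) : Int)) by
        congr 1; rcases abs_cases d with ⟨h1, _⟩ | ⟨h1, _⟩ <;> (push_cast; omega)]
    rw [pvWalk_choose]
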